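-- pv_equiv track=rewrite | github.com/Agentic-Environmental-Engineering/GymVerse | gem/gem/envs/example/algorithm_AlgorithmRepair_circulating_grid_env_env.py | _check_structure
-- ===== SOURCE A (Python) =====
-- from typing import Tuple, Dict, Any, Optional
--
-- def _check_structure(program: list) -> Tuple[bool, str]:
--     loop_count = sum(1 for l in program if l.strip().startswith("LOOP"))
--     end_count = sum(1 for l in program if l.strip().startswith("ENDLOOP"))
--     ret_count = sum(1 for l in program if l.strip().startswith("RETURN"))
--     if loop_count != 1 or end_count != 1 or ret_count != 1:
--         return False, "Program must contain exactly one LOOP, one ENDLOOP, and one RETURN."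
--     loop_idx = next(i for i, l in enumerate(program) if l.strip().startswith("LOOP"))
--     end_idx = next(i for i, l in enumerate(program) if l.strip().startswith("ENDLOOP"))
--     if not (loop_idx < end_idx):
--         return False, "ENDLOOP must come after LOOP."
--     return True, "OK"
-- ===== SOURCE B (Python) =====
-- def _check_structure(program: list):
--     lc = ec = rc = 0
--     li = ei = None
--     for i, l in enumerate(program):
--         s = l.strip()
--         if s.startswith("LOOP"):
--             lc += 1
--             if li is None:
--                 li = i
--         if s.startswith("ENDLOOP"):
--             ec += 1
--             if ei is None:
--                 ei = i
--         if s.startswith("RETURN"):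
--             rc += 1
--     if lc != 1 or ec != 1 or rc != 1:
--         return False, "Program must contain exactly one LOOP, one ENDLOOP, and one RETURN."
--     if not (li < ei):
--         return False, "ENDLOOP must come after LOOP."
--     return True, "OK"
-- ===== Notes on version B (the rewrite author's own statement) =====
-- stated objective: faster
-- what changed: Replaces A's five separate scans of the program (three counting generator passes plus two next(enumerate(...)) searches) with a single pass that maintains the three counts and the first LOOP/ENDLOOP indices in one loop.
import Mathlib
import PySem

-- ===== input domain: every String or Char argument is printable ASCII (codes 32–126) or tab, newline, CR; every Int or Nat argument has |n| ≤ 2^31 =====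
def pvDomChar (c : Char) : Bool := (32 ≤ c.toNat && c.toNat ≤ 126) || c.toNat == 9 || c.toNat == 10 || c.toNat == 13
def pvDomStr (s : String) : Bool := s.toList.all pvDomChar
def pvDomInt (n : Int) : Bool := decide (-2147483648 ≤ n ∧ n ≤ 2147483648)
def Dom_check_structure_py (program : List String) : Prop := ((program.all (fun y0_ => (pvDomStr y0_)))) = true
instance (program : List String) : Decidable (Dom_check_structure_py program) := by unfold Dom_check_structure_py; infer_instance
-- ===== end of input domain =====

-- B makes ONE pass over enumerate(program) maintaining the counts and first indices, instead of A's
-- five separate scans (three counting passes + two next(enumerate(...)) searches); return value only.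

-- ===== PORT A =====
-- next(i for i, l in enumerate(program) if c(l)): first matching index; callers guard count = 1,
-- so the none branch (Python: StopIteration) is unreachable.
def pvNextIdx (c : String → Bool) (program : List String) : Int :=
  match (PySem.List.enumerate program 0).find? (fun p => c p.2) with
  | some p => p.1
  | none => 0

def check_structure_py (program : List String) : Bool × String :=
  let loop_count := program.countP (fun l => PySem.Str.startswith (PySem.Str.strip l) "LOOP")
  let end_count := program.countP (fun l => PySem.Str.startswith (PySem.Str.strip l) "ENDLOOP")
  let ret_count := program.countP (fun l => PySem.Str.startswith (PySem.Str.strip l) "RETURN")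
  if loop_count ≠ 1 ∨ end_count ≠ 1 ∨ ret_count ≠ 1 then
    (false, "Program must contain exactly one LOOP, one ENDLOOP, and one RETURN.")
  else
    let loop_idx := pvNextIdx (fun l => PySem.Str.startswith (PySem.Str.strip l) "LOOP") program
    let end_idx := pvNextIdx (fun l => PySem.Str.startswith (PySem.Str.strip l) "ENDLOOP") program
    if ¬ (loop_idx < end_idx) then (false, "ENDLOOP must come after LOOP.")
    else (true, "OK")

-- ===== PORT B =====
-- one loop body of Source B: update (lc, ec, rc, li, ei) for line p.2 at index p.1
def pvAltStep (st : Nat × Nat × Nat × Option Int × Option Int) (p : Int × String) :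
    Nat × Nat × Nat × Option Int × Option Int :=
  let s := PySem.Str.strip p.2
  let lc := if PySem.Str.startswith s "LOOP" then st.1 + 1 else st.1
  let li := if PySem.Str.startswith s "LOOP" then
              (if st.2.2.2.1.isNone then some p.1 else st.2.2.2.1) else st.2.2.2.1
  let ec := if PySem.Str.startswith s "ENDLOOP" then st.2.1 + 1 else st.2.1
  let ei := if PySem.Str.startswith s "ENDLOOP" then
              (if st.2.2.2.2.isNone then some p.1 else st.2.2.2.2) else st.2.2.2.2
  let rc := if PySem.Str.startswith s "RETURN" then st.2.2.1 + 1 else st.2.2.1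
  (lc, ec, rc, li, ei)

def check_structure_py_alt (program : List String) : Bool × String :=
  let st := (PySem.List.enumerate program 0).foldl pvAltStep (0, 0, 0, none, none)
  if st.1 ≠ 1 ∨ st.2.1 ≠ 1 ∨ st.2.2.1 ≠ 1 then
    (false, "Program must contain exactly one LOOP, one ENDLOOP, and one RETURN.")
  else
    -- li and ei are ints here in Python (counts = 1 guarantee they were set)
    match st.2.2.2.1, st.2.2.2.2 with
    | some a, some b => if ¬ (a < b) then (false, "ENDLOOP must come after LOOP.") else (true, "OK")
    | _, _ => (false, "ENDLOOP must come after LOOP.")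

-- ===== PRECONDITION & SPEC =====
def Spec_check_structure_py (program : List String) (out : Bool × String) : Prop := out = check_structure_py_alt program
instance (program : List String) (out : Bool × String) : Decidable (Spec_check_structure_py program out) := by unfold Spec_check_structure_py; infer_instance

-- ===== CLAIM (what is proved, stated in full; the proofs are below) =====
def Claim_equal_check_structure_py : Prop := ∀ (program : List String), Dom_check_structure_py program → Spec_check_structure_py program (check_structure_py program)

-- ===== LEMMAS AND PROOFS =====

-- fold invariant of B's single pass, with the three predicates abstract (counts accumulate,
-- first indices combine with Option.or)
lemma pvFoldGen (cL cE cR : String → Bool) (xs : List String) :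
    ∀ (s : Int) (lc ec rc : Nat) (li ei : Option Int),
    (PySem.List.enumerate xs s).foldl
      (fun st (p : Int × String) =>
        ((if cL p.2 then st.1 + 1 else st.1 : Nat),
         (if cE p.2 then st.2.1 + 1 else st.2.1 : Nat),
         (if cR p.2 then st.2.2.1 + 1 else st.2.2.1 : Nat),
         (if cL p.2 then (if st.2.2.2.1.isNone then some p.1 else st.2.2.2.1) else st.2.2.2.1),
         (if cE p.2 then (if st.2.2.2.2.isNone then some p.1 else st.2.2.2.2) else st.2.2.2.2)))
      (lc, ec, rc, li, ei) =
      (lc + xs.countP cL, ec + xs.countP cE, rc + xs.countP cR,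
       li.or (((PySem.List.enumerate xs s).find? (fun p => cL p.2)).map (·.1)),
       ei.or (((PySem.List.enumerate xs s).find? (fun p => cE p.2)).map (·.1))) := by
  induction xs with
  | nil => intro s lc ec rc li ei; simp [PySem.List.enumerate_nil]
  | cons x xs ih =>
    intro s lc ec rc li ei
    rw [PySem.List.enumerate_cons, List.foldl_cons, ih]
    by_cases hl : cL x <;> by_cases he : cE x <;> by_cases hr : cR x <;>
      simp [hl, he, hr] <;>
      cases li <;> cases ei <;>
      (try simp [Option.or]) <;>
      (try and_intros) <;>
      first | rfl | omega | simp

lemma pvFind_isSome (c : String → Bool) (xs : List String) :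
    ∀ (s : Int), xs.countP c ≠ 0 →
    (((PySem.List.enumerate xs s).find? (fun p => c p.2)).isSome) = true := by
  induction xs with
  | nil => intro s h; simp at h
  | cons x xs ih =>
    intro s h
    rw [PySem.List.enumerate_cons]
    by_cases hx : c x
    · rw [List.find?_cons_of_pos (by simpa using hx)]; rfl
    · rw [List.find?_cons_of_neg (by simpa using hx)]
      apply ih
      simp only [List.countP_cons, hx] at h
      simpa using h

lemma pvAltStep_eq : pvAltStep = fun (st : Nat × Nat × Nat × Option Int × Option Int) (p : Int × String) =>
    ((if (fun l => PySem.Str.startswith (PySem.Str.strip l) "LOOP") p.2 then st.1 + 1 else st.1 : Nat),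
     (if (fun l => PySem.Str.startswith (PySem.Str.strip l) "ENDLOOP") p.2 then st.2.1 + 1 else st.2.1 : Nat),
     (if (fun l => PySem.Str.startswith (PySem.Str.strip l) "RETURN") p.2 then st.2.2.1 + 1 else st.2.2.1 : Nat),
     (if (fun l => PySem.Str.startswith (PySem.Str.strip l) "LOOP") p.2 then
        (if st.2.2.2.1.isNone then some p.1 else st.2.2.2.1) else st.2.2.2.1),
     (if (fun l => PySem.Str.startswith (PySem.Str.strip l) "ENDLOOP") p.2 then
        (if st.2.2.2.2.isNone then some p.1 else st.2.2.2.2) else st.2.2.2.2)) := rfl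

-- ===== VERDICT (by name: the statement is the Claim_ definition above) =====
theorem check_structure_py_spec : Claim_equal_check_structure_py := by
  intro program _
  unfold Spec_check_structure_py check_structure_py check_structure_py_alt
  rw [pvAltStep_eq]
  rw [pvFoldGen (fun l => PySem.Str.startswith (PySem.Str.strip l) "LOOP")
      (fun l => PySem.Str.startswith (PySem.Str.strip l) "ENDLOOP")
      (fun l => PySem.Str.startswith (PySem.Str.strip l) "RETURN") program 0 0 0 0 none none]
  simp only [Nat.zero_add, Option.none_or]
  by_cases hg : (program.countP (fun l => PySem.Str.startswith (PySem.Str.strip l) "LOOP") ≠ 1 ∨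
      program.countP (fun l => PySem.Str.startswith (PySem.Str.strip l) "ENDLOOP") ≠ 1 ∨
      program.countP (fun l => PySem.Str.startswith (PySem.Str.strip l) "RETURN") ≠ 1)
  · rw [if_pos hg, if_pos hg]
  · push_neg at hg
    obtain ⟨h1, h2, h3⟩ := hg
    have hga : ¬(program.countP (fun l => PySem.Str.startswith (PySem.Str.strip l) "LOOP") ≠ 1 ∨
        program.countP (fun l => PySem.Str.startswith (PySem.Str.strip l) "ENDLOOP") ≠ 1 ∨
        program.countP (fun l => PySem.Str.startswith (PySem.Str.strip l) "RETURN") ≠ 1) := by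
      push_neg
      exact ⟨h1, h2, h3⟩
    rw [if_neg hga, if_neg hga]
    have hfL := pvFind_isSome (fun l => PySem.Str.startswith (PySem.Str.strip l) "LOOP") program 0 (by omega)
    have hfE := pvFind_isSome (fun l => PySem.Str.startswith (PySem.Str.strip l) "ENDLOOP") program 0 (by omega)
    obtain ⟨pL, hpL⟩ := Option.isSome_iff_exists.mp hfL
    obtain ⟨pE, hpE⟩ := Option.isSome_iff_exists.mp hfE
    simp only [pvNextIdx, hpL, hpE, Option.map_some]
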